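-- pv_equiv track=rewrite | github.com/lemikhovalex/ReservoirModel | now_do_simple_models/mult_func.py | get_segm
-- ===== SOURCE A (Python) =====
-- def get_segm(n_blocks, n_th):
--     step = n_blocks // n_th
--     extra = n_blocks % n_th
--     out = []
--     current = 0
--     for i in range(n_th):
--         if extra > 0:
--             out.append((current, current+step + 1))
--             extra -= 1
--             current += step + 1
--         else:
--             out.append((current, current+step))
--             current += step
--     return out
-- ===== SOURCE B (Python) =====
-- def get_segm(n_blocks, n_th):
--     step = n_blocks // n_th
--     extra = n_blocks % n_th
--     return [(i * step + min(i, extra), (i + 1) * step + min(i + 1, extra))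
--             for i in range(n_th)]
-- ===== Notes on version B (the rewrite author's own statement) =====
-- stated objective: simpler
-- what changed: Replaces the stateful loop threading a running offset and a decremented remainder with a single list comprehension whose boundaries come from the closed-form prefix expression i*step + min(i, extra).
import Mathlib
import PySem

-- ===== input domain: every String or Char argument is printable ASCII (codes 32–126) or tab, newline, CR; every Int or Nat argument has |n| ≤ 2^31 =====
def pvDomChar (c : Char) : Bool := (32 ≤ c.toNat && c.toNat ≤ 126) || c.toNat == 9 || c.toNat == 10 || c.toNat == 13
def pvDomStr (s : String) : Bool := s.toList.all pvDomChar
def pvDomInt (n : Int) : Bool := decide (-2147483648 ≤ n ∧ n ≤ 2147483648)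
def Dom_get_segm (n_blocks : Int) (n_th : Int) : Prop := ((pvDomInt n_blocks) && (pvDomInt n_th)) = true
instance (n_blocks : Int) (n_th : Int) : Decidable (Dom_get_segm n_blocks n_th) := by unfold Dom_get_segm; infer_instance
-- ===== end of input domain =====

-- B replaces A's stateful loop (running offset + decremented remainder) with a closed-form
-- comprehension: segment i is (i*step + min i extra, (i+1)*step + min (i+1) extra).

-- ===== PORT A =====
-- loop body of A: state = (out, extra, current)
def getSegmStep (step : Int) (s : List (Int × Int) × Int × Int) (_i : Int) :
    List (Int × Int) × Int × Int :=
  match s with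
  | (out, extra, current) =>
    if extra > 0 then
      (out ++ [(current, current + step + 1)], extra - 1, current + step + 1)
    else
      (out ++ [(current, current + step)], extra, current + step)

def get_segm (n_blocks : Int) (n_th : Int) : List (Int × Int) :=
  let step := PySem.Int.floordiv n_blocks n_th
  let extra := PySem.Int.mod n_blocks n_th
  ((PySem.List.pyRange 0 n_th 1).foldl (getSegmStep step) ([], extra, 0)).1

-- ===== PORT B =====
def get_segm_alt (n_blocks : Int) (n_th : Int) : List (Int × Int) :=
  let step := PySem.Int.floordiv n_blocks n_th
  let extra := PySem.Int.mod n_blocks n_th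
  (PySem.List.pyRange 0 n_th 1).map
    (fun i => (i * step + min i extra, (i + 1) * step + min (i + 1) extra))

-- ===== PRECONDITION & SPEC =====
-- Pre_ excludes exactly n_th = 0, where the Python A (and B) raise ZeroDivisionError.
def Pre_get_segm (n_blocks : Int) (n_th : Int) : Prop := n_th ≠ 0
instance (n_blocks : Int) (n_th : Int) : Decidable (Pre_get_segm n_blocks n_th) := by
  unfold Pre_get_segm; infer_instance
def pvWitness_get_segm : Int × Int := (10, 3)

def Spec_get_segm (n_blocks : Int) (n_th : Int) (out : List (Int × Int)) : Prop :=
  out = get_segm_alt n_blocks n_th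
instance (n_blocks : Int) (n_th : Int) (out : List (Int × Int)) : Decidable (Spec_get_segm n_blocks n_th out) := by
  unfold Spec_get_segm; infer_instance

-- ===== CLAIM (what is proved, stated in full; the proofs are below) =====
def Claim_equal_get_segm : Prop := ∀ (n_blocks : Int) (n_th : Int), Dom_get_segm n_blocks n_th → Pre_get_segm n_blocks n_th → Spec_get_segm n_blocks n_th (get_segm n_blocks n_th)

-- ===== LEMMAS AND PROOFS =====

-- invariant of A's loop: after n iterations the state is the closed form B computes
theorem getSegm_loop (step e : Int) (he : 0 ≤ e) (n : Nat) :
    (PySem.List.pyRange 0 (n : Int) 1).foldl (getSegmStep step) ([], e, 0)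
      = ((PySem.List.pyRange 0 (n : Int) 1).map
           (fun i => (i * step + min i e, (i + 1) * step + min (i + 1) e)),
         e - min (n : Int) e, (n : Int) * step + min (n : Int) e) := by
  induction n with
  | zero =>
      simp only [Nat.cast_zero]
      rw [PySem.List.pyRange_one]
      simp [min_eq_left he]
  | succ k ih =>
      have hc : ((k + 1 : Nat) : Int) = (k : Int) + 1 := by push_cast; ring
      rw [hc, PySem.List.pyRange_one_succ_right (by positivity),
          List.foldl_append, List.map_append, ih]
      simp only [List.foldl_cons, List.foldl_nil, List.map_cons, List.map_nil, getSegmStep]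
      by_cases hk : (k : Int) < e
      · have h1 : e - min (k : Int) e > 0 := by omega
        have h2 : min (k : Int) e = (k : Int) := by omega
        have h3 : min ((k : Int) + 1) e = (k : Int) + 1 := by omega
        rw [if_pos h1, h2, h3]
        have harith : ((k : Int) * step + k + step + 1) = ((k : Int) + 1) * step + ((k : Int) + 1) := by ring
        simp only [Prod.mk.injEq]
        refine ⟨by rw [harith], by omega, by ring⟩
      · have h1 : ¬ (e - min (k : Int) e > 0) := by omega
        have h2 : min (k : Int) e = e := by omega
        have h3 : min ((k : Int) + 1) e = e := by omega
        rw [if_neg h1, h2, h3]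
        have harith : ((k : Int) * step + e + step) = ((k : Int) + 1) * step + e := by ring
        simp only [Prod.mk.injEq]
        refine ⟨by rw [harith], by trivial, by ring⟩

-- ===== VERDICT (by name: the statement is the Claim_ definition above) =====
theorem get_segm_spec : Claim_equal_get_segm := by
  intro n_blocks n_th _hd hpre
  unfold Spec_get_segm get_segm get_segm_alt
  by_cases hneg : n_th < 0
  · have h0 : (n_th - 0).toNat = 0 := by omega
    rw [PySem.List.pyRange_one, h0]
    simp
  · have hpos : 0 < n_th := by
      rcases lt_trichotomy n_th 0 with h | h | h
      · exact absurd h hneg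
      · exact absurd h hpre
      · exact h
    have hn : n_th = ((n_th.toNat : Nat) : Int) := by omega
    rw [hn]
    have he : 0 ≤ PySem.Int.mod n_blocks ((n_th.toNat : Nat) : Int) :=
      PySem.Int.mod_nonneg _ (by omega)
    simp only [getSegm_loop _ _ he]
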